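-- pv_equiv track=rewrite | github.com/ComSSA/neat | neat.py | parse
-- ===== SOURCE A (Python) =====
-- def parse(command):
--     state = "none"
--     result = []
--     next = ""
--     for i in command:
--         if state == "none":
--             if i in "\\":
--                 state = "some escape"
--             elif i == "'":
--                 state = "single"
--             elif i == '"':
--                 state = "double"
--             elif i in "\b\t\n\v\f\r ":
--                 pass
--             else:
--                 state = "some"
--                 next += i
--         elif state == "some":
--             if i in "\\":
--                 state = "some escape"
--             elif i == "'":
--                 state = "single"
--             elif i == '"':
--                 state = "double"
--             elif i in "\b\t\n\v\f\r ":
--                 state = "none"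
--                 result += [next]
--                 next = ""
--             else:
--                 next += i
--         elif state == "some escape":
--             state = "some"
--             next += i
--         elif state == "single":
--             if i == "'":
--                 state = "some"
--             else:
--                 next += i
--         elif state == "double":
--             if i == '"':
--                 state = "some"
--             elif i == "\\":
--                 state = "double escape"
--             else:
--                 next += i
--         elif state == "double escape":
--             state = "double"
--             if i == '"':
--                 next += '"'
--             elif i == "\\":
--                 next += "\\"
--             else:
--                 next += "\\%s" % i
--         else:
--             raise Exception(state) # FIXME: be more specific
--     if state == "some":
--         result += [next]
--     elif state != "none":
--         raise Exception(state) # FIXME: be more specific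
--     return result
-- ===== SOURCE B (Python) =====
-- def parse(command):
--     ws = "\b\t\n\v\f\r "
--     n = len(command)
--     i = 0
--     result = []
--     while i < n:
--         if command[i] in ws:
--             i += 1
--             continue
--         # build exactly one argument
--         token = []
--         mode = "plain"
--         while i < n:
--             c = command[i]
--             if mode == "plain":
--                 if c in ws:
--                     break
--                 elif c == "\\":
--                     mode = "escape"
--                 elif c == "'":
--                     mode = "single"
--                 elif c == '"':
--                     mode = "double"
--                 else:
--                     token.append(c)
--             elif mode == "escape":
--                 token.append(c)
--                 mode = "plain"
--             elif mode == "single":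
--                 if c == "'":
--                     mode = "plain"
--                 else:
--                     token.append(c)
--             else:  # double
--                 if c == '"':
--                     mode = "plain"
--                 elif c == "\\":
--                     i += 1
--                     if i >= n:
--                         raise Exception("unterminated escape in double quote")
--                     c2 = command[i]
--                     if c2 == '"' or c2 == "\\":
--                         token.append(c2)
--                     else:
--                         token.append("\\")
--                         token.append(c2)
--                 else:
--                     token.append(c)
--             i += 1
--         if mode != "plain":
--             raise Exception("unterminated " + mode)
--         result.append("".join(token))
--     return result
-- ===== Notes on version B (the rewrite author's own statement) =====
-- stated objective: alternative
-- what changed: Replaces A's single six-state for-loop automaton threading (state,result,next) across the whole string by a two-level tokenizer: an outer index loop that skips separator whitespace and an inner loop that builds exactly one argument (plain/single/double/escape sub-modes, with the double-quote backslash handled by one-character lookahead instead of a dedicated state); Pre_ excludes only inputs with an unterminated quote/escape, on which both A and B raise Exception.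
import Mathlib
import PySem

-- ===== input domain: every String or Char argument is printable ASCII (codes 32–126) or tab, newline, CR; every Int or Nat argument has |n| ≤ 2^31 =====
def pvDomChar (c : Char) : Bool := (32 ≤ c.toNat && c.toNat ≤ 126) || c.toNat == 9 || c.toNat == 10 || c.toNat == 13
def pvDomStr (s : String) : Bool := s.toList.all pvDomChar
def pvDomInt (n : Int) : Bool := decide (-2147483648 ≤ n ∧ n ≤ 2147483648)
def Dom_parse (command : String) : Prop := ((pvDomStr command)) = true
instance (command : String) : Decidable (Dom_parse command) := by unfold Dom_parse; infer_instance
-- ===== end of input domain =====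

-- B restructures A's one six-state automaton over the whole string into an outer
-- whitespace-skipping loop with an inner one-token builder (alternative decomposition,
-- same cost); equivalence is claimed on Pre_parse, the inputs where the Python A returns.

-- the separator set "\b\t\n\v\f\r " shared by both programs
def wsChars : List Char := ['\x08', '\t', '\n', '\x0B', '\x0C', '\r', ' ']

-- ===== PORT A =====
inductive AState
  | anone | asome | aesc | asingle | adouble | adesc

-- literal transliteration of A's for-loop threading (state, result, next); the growing
-- Python string `next` is carried as its char list; where the Python raises (final state
-- not none/some) the port returns the completed tokens — those inputs are outside Pre_parse
def parseA : List Char → AState → List String → List Char → List String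
  | [], st, res, next =>
    match st with
    | .asome => res ++ [String.ofList next]
    | _ => res
  | c :: t, st, res, next =>
    match st with
    | .anone =>
      if c = '\\' then parseA t .aesc res next
      else if c = '\'' then parseA t .asingle res next
      else if c = '"' then parseA t .adouble res next
      else if wsChars.contains c then parseA t .anone res next
      else parseA t .asome res (next ++ [c])
    | .asome =>
      if c = '\\' then parseA t .aesc res next
      else if c = '\'' then parseA t .asingle res next
      else if c = '"' then parseA t .adouble res next
      else if wsChars.contains c then parseA t .anone (res ++ [String.ofList next]) []
      else parseA t .asome res (next ++ [c])
    | .aesc => parseA t .asome res (next ++ [c])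
    | .asingle =>
      if c = '\'' then parseA t .asome res next else parseA t .asingle res (next ++ [c])
    | .adouble =>
      if c = '"' then parseA t .asome res next
      else if c = '\\' then parseA t .adesc res next
      else parseA t .adouble res (next ++ [c])
    | .adesc =>
      if c = '"' then parseA t .adouble res (next ++ ['"'])
      else if c = '\\' then parseA t .adouble res (next ++ ['\\'])
      else parseA t .adouble res (next ++ ['\\', c])

def parse (command : String) : List String := parseA command.toList .anone [] []

-- ===== PORT B =====
inductive BMode
  | plain | escape | single | double

-- B's inner loop: consume exactly one argument, returning (token, final mode, rest);
-- it stops on unquoted whitespace (left in rest) or at end of input; where the Python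
-- raises (end of input inside a double-quote backslash) it returns a non-plain mode
def bInner : List Char → BMode → List Char → List Char × BMode × List Char
  | [], m, tok => (tok, m, [])
  | c :: t, .plain, tok =>
    if wsChars.contains c then (tok, .plain, c :: t)
    else if c = '\\' then bInner t .escape tok
    else if c = '\'' then bInner t .single tok
    else if c = '"' then bInner t .double tok
    else bInner t .plain (tok ++ [c])
  | c :: t, .escape, tok => bInner t .plain (tok ++ [c])
  | c :: t, .single, tok =>
    if c = '\'' then bInner t .plain tok else bInner t .single (tok ++ [c])
  | c :: t, .double, tok =>
    if c = '"' then bInner t .plain tok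
    else if c = '\\' then
      match t with
      | [] => (tok, .double, [])
      | c2 :: t2 =>
        if c2 = '"' ∨ c2 = '\\' then bInner t2 .double (tok ++ [c2])
        else bInner t2 .double (tok ++ ['\\', c2])
    else bInner t .double (tok ++ [c])

-- the rest returned by bInner is no longer than the input: needed for bOuter's termination
theorem bInner_len : ∀ (l : List Char) (m : BMode) (tok : List Char),
    (bInner l m tok).2.2.length ≤ l.length := by
  intro l m tok
  fun_induction bInner l m tok <;> simp_all <;> omega

theorem bInner_cons_len (c : Char) (t : List Char) (tok : List Char)
    (h : wsChars.contains c = false) :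
    (bInner (c :: t) .plain tok).2.2.length ≤ t.length := by
  rw [bInner]
  split_ifs with h1 h2 h3 h4
  · exact absurd h1 (by simpa using h)
  all_goals exact bInner_len _ _ _

-- B's outer loop: skip separator whitespace, build one token, repeat; a non-plain final
-- mode is the Python's raise (excluded by Pre_parse)
def bOuter : List Char → List String
  | [] => []
  | c :: t =>
    if hws : wsChars.contains c then bOuter t
    else
      match h : bInner (c :: t) .plain [] with
      | (tok, .plain, rest) => String.ofList tok :: bOuter rest
      | _ => []
termination_by l => l.length
decreasing_by
  · simp
  · have := bInner_cons_len c t [] (by simpa using hws)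
    rw [h] at this
    simp at this ⊢
    omega

def parse_alt (command : String) : List String := bOuter command.toList

-- ===== PRECONDITION & SPEC =====
-- quote/escape balance automaton (no token building): Pre_parse holds exactly when the
-- command has no unterminated quote or escape at end of input, i.e. exactly when the
-- Python A returns normally (elsewhere both A and B raise Exception)
inductive QMode
  | qnorm | qesc | qsingle | qdouble | qdesc
deriving DecidableEq

def qStep : QMode → Char → QMode
  | .qnorm, c =>
    if c = '\\' then .qesc
    else if c = '\'' then .qsingle
    else if c = '"' then .qdouble
    else .qnorm
  | .qesc, _ => .qnorm
  | .qsingle, c => if c = '\'' then .qnorm else .qsingle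
  | .qdouble, c =>
    if c = '"' then .qnorm else if c = '\\' then .qdesc else .qdouble
  | .qdesc, _ => .qdouble

def Pre_parse (command : String) : Prop := command.toList.foldl qStep .qnorm = .qnorm

instance (command : String) : Decidable (Pre_parse command) := by
  unfold Pre_parse; infer_instance

def pvWitness_parse : String := "echo \"a \\\"b\" 'c d'  e\\ f"

def Spec_parse (command : String) (out : List String) : Prop := out = parse_alt command
instance (command : String) (out : List String) : Decidable (Spec_parse command out) := by unfold Spec_parse; infer_instance

-- ===== CLAIM (what is proved, stated in full; the proofs are below) =====
def Claim_equal_parse : Prop := ∀ (command : String), Dom_parse command → Pre_parse command → Spec_parse command (parse command)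

-- ===== LEMMAS AND PROOFS =====

-- how bInner's result is consumed by bOuter
def assemble : List Char × BMode × List Char → List String
  | (tok, .plain, rest) => String.ofList tok :: bOuter rest
  | _ => []

-- the double-escape lookahead, as seen from A's adesc state
def dAssemble : List Char → List Char → List String
  | [], _ => []
  | c :: t, tok =>
    if c = '"' then assemble (bInner t .double (tok ++ ['"']))
    else if c = '\\' then assemble (bInner t .double (tok ++ ['\\']))
    else assemble (bInner t .double (tok ++ ['\\', c]))

-- one-step equations for bOuter
theorem bOuter_ws (c : Char) (t : List Char) (h : wsChars.contains c = true) :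
    bOuter (c :: t) = bOuter t := by
  rw [bOuter, dif_pos h]
theorem bOuter_cons (c : Char) (t : List Char) (h : wsChars.contains c = false) :
    bOuter (c :: t) = assemble (bInner (c :: t) .plain []) := by
  rcases hbi : bInner (c :: t) .plain [] with ⟨tok, m, rest⟩
  rw [bOuter, dif_neg (by simpa using h), hbi]
  cases m <;> rfl

theorem main_lemma : ∀ l : List Char,
    (∀ res : List String, parseA l .anone res [] = res ++ bOuter l) ∧
    (∀ (res : List String) (tok : List Char),
      parseA l .asome res tok = res ++ assemble (bInner l .plain tok)) ∧
    (∀ (res : List String) (tok : List Char),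
      parseA l .aesc res tok = res ++ assemble (bInner l .escape tok)) ∧
    (∀ (res : List String) (tok : List Char),
      parseA l .asingle res tok = res ++ assemble (bInner l .single tok)) ∧
    (∀ (res : List String) (tok : List Char),
      parseA l .adouble res tok = res ++ assemble (bInner l .double tok)) ∧
    (∀ (res : List String) (tok : List Char),
      parseA l .adesc res tok = res ++ dAssemble l tok) := by
  intro l
  induction l with
  | nil =>
    refine ⟨?_, ?_, ?_, ?_, ?_, ?_⟩ <;> intros <;>
      simp [parseA, bOuter, bInner, assemble, dAssemble]
  | cons c t ih =>
    obtain ⟨ihn, ihp, ihe, ihs, ihd, ihx⟩ := ih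
    refine ⟨?_, ?_, ?_, ?_, ?_, ?_⟩
    · intro res
      rw [parseA]
      by_cases h1 : c = '\\'
      · subst h1
        rw [bOuter_cons _ _ (by decide), bInner.eq_def]
        simp [wsChars, ihe]
      · by_cases h2 : c = '\''
        · subst h2
          rw [bOuter_cons _ _ (by decide), bInner.eq_def]
          simp [wsChars, ihs]
        · by_cases h3 : c = '"'
          · subst h3
            rw [bOuter_cons _ _ (by decide), bInner.eq_def]
            simp [wsChars, ihd]
          · by_cases hw : wsChars.contains c = true
            · rw [bOuter_ws _ _ hw]
              have hm : c ∈ wsChars := by simpa using hw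
              simp [h1, h2, h3, hm, ihn]
            · have hw' : wsChars.contains c = false := by simpa using hw
              rw [bOuter_cons _ _ hw', bInner.eq_def]
              have hm : c ∉ wsChars := by simpa using hw'
              simp [h1, h2, h3, hm, ihp]
    · intro res tok
      rw [parseA, bInner.eq_def]
      by_cases h1 : c = '\\'
      · subst h1
        simp [wsChars, ihe]
      · by_cases h2 : c = '\''
        · subst h2
          simp [wsChars, ihs]
        · by_cases h3 : c = '"'
          · subst h3
            simp [wsChars, ihd]
          · by_cases hw : wsChars.contains c = true
            · have hm : c ∈ wsChars := by simpa using hw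
              simp [h1, h2, h3, hm, ihn, assemble, bOuter_ws _ _ hw]
            · have hm : c ∉ wsChars := by simpa using hw
              simp [h1, h2, h3, hm, ihp]
    · intro res tok
      rw [parseA, bInner.eq_def]
      simp [ihp]
    · intro res tok
      rw [parseA, bInner.eq_def]
      by_cases h : c = '\''
      · subst h
        simp [ihp]
      · simp [h, ihs]
    · intro res tok
      rw [parseA]
      by_cases h1 : c = '"'
      · subst h1
        rw [bInner.eq_def]
        simp [ihp]
      · by_cases h2 : c = '\\'
        · subst h2
          simp [h1, ihx]
          cases t with
          | nil => rw [bInner.eq_def]; simp [dAssemble, assemble]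
          | cons c2 t2 =>
            rw [bInner.eq_def, dAssemble]
            by_cases ha : c2 = '"'
            · simp [ha]
            · by_cases hb : c2 = '\\'
              · simp [ha, hb]
              · simp [ha, hb]
        · rw [bInner.eq_def]
          simp [h1, h2, ihd]
    · intro res tok
      rw [parseA]
      by_cases h1 : c = '"'
      · subst h1
        rw [dAssemble]
        simp [ihd]
      · by_cases h2 : c = '\\'
        · subst h2
          rw [dAssemble]
          simp [h1, ihd]
        · rw [dAssemble]
          simp [h1, h2, ihd]

-- ===== VERDICT (by name: the statement is the Claim_ definition above) =====
theorem parse_spec : Claim_equal_parse := by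
  intro command _ _
  unfold Spec_parse parse parse_alt
  simpa using (main_lemma command.toList).1 []
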